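-- pv_equiv track=rewrite | github.com/Aoife-Bee/box-jump | doors_helper.py | get_door_rect
-- ===== SOURCE A (Python) =====
-- def get_door_rect(layout, marker="."):
--     coords = [
--         (row_i, col_i)
--         for row_i, row in enumerate(layout)
--         for col_i, ch in enumerate(row)
--         if ch == marker
--     ]
--
--     if not coords:
--         return None
--
--     rows = [r for r, _ in coords]
--     cols = [c for _, c in coords]
--
--     min_row = min(rows)
--     max_row = max(rows)
--     min_col = min(cols)
--     max_col = max(cols)
--
--     width = max_col - min_col + 1
--     height = max_row - min_row + 1
--
--     return (min_col, min_row, width, height)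
-- ===== SOURCE B (Python) =====
-- def get_door_rect(layout, marker="."):
--     best = None  # (min_row, max_row, min_col, max_col) so far
--     for row_i, row in enumerate(layout):
--         for col_i, ch in enumerate(row):
--             if ch == marker:
--                 if best is None:
--                     best = (row_i, row_i, col_i, col_i)
--                 else:
--                     mr, Mr, mc, Mc = best
--                     best = (min(mr, row_i), max(Mr, row_i),
--                             min(mc, col_i), max(Mc, col_i))
--     if best is None:
--         return None
--     mr, Mr, mc, Mc = best
--     return (mc, mr, Mc - mc + 1, Mr - mr + 1)
-- ===== Notes on version B (the rewrite author's own statement) =====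
-- stated objective: simpler
-- what changed: B fuses A's coordinate-list comprehension and four separate min/max list reductions into one pass over the grid maintaining a single running-extrema tuple (None until the first marker).
import Mathlib
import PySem

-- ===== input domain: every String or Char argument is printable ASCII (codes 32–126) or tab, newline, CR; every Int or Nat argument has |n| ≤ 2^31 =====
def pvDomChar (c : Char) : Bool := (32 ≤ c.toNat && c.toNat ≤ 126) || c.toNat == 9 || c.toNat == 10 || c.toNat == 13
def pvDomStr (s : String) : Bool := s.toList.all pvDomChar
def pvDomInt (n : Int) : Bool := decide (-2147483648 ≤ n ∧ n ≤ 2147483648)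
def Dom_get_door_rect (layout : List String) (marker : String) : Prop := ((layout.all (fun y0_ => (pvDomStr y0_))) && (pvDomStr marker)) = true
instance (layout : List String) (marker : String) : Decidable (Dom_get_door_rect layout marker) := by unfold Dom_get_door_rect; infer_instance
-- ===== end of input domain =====

-- B replaces A's coordinate-list comprehension plus four separate min/max reductions by
-- one pass over the grid maintaining a running-extrema tuple (simpler, one traversal).

-- ===== PORT A =====
def get_door_rect (layout : List String) (marker : String) : Option (Int × Int × Int × Int) :=
  let coords : List (Int × Int) :=
    (PySem.List.enumerate layout 0).flatMap (fun p =>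
      (PySem.List.enumerate p.2.toList 0).filterMap (fun q =>
        if String.ofList [q.2] = marker then some (p.1, q.1) else none))
  match coords with
  | [] => none
  | _ :: _ =>
    let rows := coords.map (·.1)
    let cols := coords.map (·.2)
    let min_row := (PySem.List.min? rows (fun x => x)).getD 0   -- rows nonempty: default unused
    let max_row := (PySem.List.max? rows (fun x => x)).getD 0
    let min_col := (PySem.List.min? cols (fun x => x)).getD 0
    let max_col := (PySem.List.max? cols (fun x => x)).getD 0
    let width := max_col - min_col + 1
    let height := max_row - min_row + 1
    some (min_col, min_row, width, height)

-- ===== PORT B =====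
-- running extrema (min_row, max_row, min_col, max_col); none = no marker seen yet
def gdrStep (st : Option (Int × Int × Int × Int)) (ri ci : Int) : Option (Int × Int × Int × Int) :=
  match st with
  | none => some (ri, ri, ci, ci)
  | some (mr, Mr, mc, Mc) => some (min mr ri, max Mr ri, min mc ci, max Mc ci)

def get_door_rect_alt (layout : List String) (marker : String) : Option (Int × Int × Int × Int) :=
  let best :=
    (PySem.List.enumerate layout 0).foldl (fun st p =>
      (PySem.List.enumerate p.2.toList 0).foldl (fun st q =>
        if String.ofList [q.2] = marker then gdrStep st p.1 q.1 else st) st) none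
  match best with
  | none => none
  | some (mr, Mr, mc, Mc) => some (mc, mr, Mc - mc + 1, Mr - mr + 1)

-- ===== PRECONDITION & SPEC =====
def Spec_get_door_rect (layout : List String) (marker : String) (out : Option (Int × Int × Int × Int)) : Prop := out = get_door_rect_alt layout marker
instance (layout : List String) (marker : String) (out : Option (Int × Int × Int × Int)) : Decidable (Spec_get_door_rect layout marker out) := by unfold Spec_get_door_rect; infer_instance

-- ===== CLAIM (what is proved, stated in full; the proofs are below) =====
def Claim_equal_get_door_rect : Prop := ∀ (layout : List String) (marker : String), Dom_get_door_rect layout marker → Spec_get_door_rect layout marker (get_door_rect layout marker)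

-- ===== LEMMAS AND PROOFS =====

-- B's inner char loop = folding gdrStep over the coords contributed by this row
theorem gdr_inner (marker : String) (ri : Int) (l : List (Int × Char)) (st : Option (Int × Int × Int × Int)) :
    l.foldl (fun st q => if String.ofList [q.2] = marker then gdrStep st ri q.1 else st) st
      = (l.filterMap (fun q => if String.ofList [q.2] = marker then some (ri, q.1) else none)).foldl
          (fun st c => gdrStep st c.1 c.2) st := by
  induction l generalizing st with
  | nil => rfl
  | cons q t ih => simp only [List.foldl_cons, List.filterMap_cons]; split <;> simp [ih]

-- folding over a flatMap = nested folds
theorem foldl_flatMap' {α β γ : Type} (h : α → List β) (step : γ → β → γ) (L : List α) (st : γ) :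
    (L.flatMap h).foldl step st = L.foldl (fun st x => (h x).foldl step st) st := by
  induction L generalizing st with
  | nil => rfl
  | cons x t ih => simp [List.flatMap_cons, List.foldl_append, ih]

-- folding gdrStep from a some-state computes the componentwise running extrema
theorem gdr_fold_some (cs : List (Int × Int)) (a b c d : Int) :
    cs.foldl (fun st x => gdrStep st x.1 x.2) (some (a, b, c, d))
      = some (cs.foldl (fun acc y => min acc y.1) a,
              cs.foldl (fun acc y => max acc y.1) b,
              cs.foldl (fun acc y => min acc y.2) c,
              cs.foldl (fun acc y => max acc y.2) d) := by
  induction cs generalizing a b c d with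
  | nil => rfl
  | cons x t ih =>
      rw [List.foldl_cons,
        show gdrStep (some (a, b, c, d)) x.1 x.2
            = some (min a x.1, max b x.1, min c x.2, max d x.2) from rfl, ih]
      simp only [List.foldl_cons]

theorem get_door_rect_eq_alt (layout : List String) (marker : String) :
    get_door_rect layout marker = get_door_rect_alt layout marker := by
  unfold get_door_rect get_door_rect_alt
  simp only [gdr_inner, ← foldl_flatMap']
  cases h : (PySem.List.enumerate layout 0).flatMap (fun p =>
      (PySem.List.enumerate p.2.toList 0).filterMap (fun q =>
        if String.ofList [q.2] = marker then some (p.1, q.1) else none)) with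
  | nil => simp
  | cons x t =>
      rw [List.foldl_cons, show gdrStep none x.1 x.2 = some (x.1, x.1, x.2, x.2) from rfl,
        gdr_fold_some]
      have hmin1 := PySem.List.min?_id_cons (x := x.1) (t := t.map (·.1))
      have hmax1 := PySem.List.max?_id_cons (x := x.1) (t := t.map (·.1))
      have hmin2 := PySem.List.min?_id_cons (x := x.2) (t := t.map (·.2))
      have hmax2 := PySem.List.max?_id_cons (x := x.2) (t := t.map (·.2))
      simp only [List.map_cons, hmin1, hmax1, hmin2, hmax2, List.foldl_map, Option.getD_some]

-- ===== VERDICT (by name: the statement is the Claim_ definition above) =====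
theorem get_door_rect_spec : Claim_equal_get_door_rect := by
  intro layout marker _
  unfold Spec_get_door_rect
  exact get_door_rect_eq_alt layout marker
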